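-- pv_equiv track=rewrite | github.com/chickengak/TIL | essential-code-notes/숫자 짝꿍.py | solution
-- ===== SOURCE A (Python) =====
-- from collections import defaultdict
--
-- def solution(X, Y):
--     d = defaultdict(int)
--     temp = ''
--     if len(X) < len(Y):
--         X, Y = Y, X
--     for i in X:
--         d[i] += 1
--
--     for j in Y:
--         if d[j] > 0:
--             d[j] -= 1
--             temp += j
--     if len(set(temp)) == 1 and temp[0] == '0':
--         return '0'
--     elif temp == '':
--         return '-1'
--     else:
--         return ''.join(sorted(temp, reverse = True))
-- ===== SOURCE B (Python) =====
-- def solution(X, Y):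
--     cx = {}
--     for ch in X:
--         cx[ch] = cx.get(ch, 0) + 1
--     cy = {}
--     for ch in Y:
--         cy[ch] = cy.get(ch, 0) + 1
--     common = sorted((c for c in cx if c in cy), reverse=True)
--     if not common:
--         return '-1'
--     if common == ['0']:
--         return '0'
--     return ''.join(c * min(cx[c], cy[c]) for c in common)
-- ===== Notes on version B (the rewrite author's own statement) =====
-- stated objective: faster
-- what changed: B never builds or sorts the matched-character string: it counts each string into a dict once, sorts only the DISTINCT common characters descending and emits each repeated min(countX,countY) times, instead of A's per-occurrence budget loop followed by a full sort of every matched character (the sort shrinks from all matched occurrences to at most the alphabet).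
import Mathlib
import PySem

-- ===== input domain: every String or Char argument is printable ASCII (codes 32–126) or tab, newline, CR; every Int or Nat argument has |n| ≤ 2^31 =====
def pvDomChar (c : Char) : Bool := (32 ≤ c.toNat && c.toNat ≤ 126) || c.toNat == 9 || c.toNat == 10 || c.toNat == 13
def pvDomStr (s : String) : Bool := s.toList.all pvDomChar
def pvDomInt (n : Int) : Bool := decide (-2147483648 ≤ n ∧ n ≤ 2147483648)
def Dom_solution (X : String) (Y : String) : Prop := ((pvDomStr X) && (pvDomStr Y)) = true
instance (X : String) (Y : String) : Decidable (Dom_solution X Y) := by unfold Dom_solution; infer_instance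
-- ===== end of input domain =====

-- B avoids building and sorting the matched-character string: it counts both strings once,
-- sorts only the distinct common characters descending and emits each min(countX,countY) times.

-- ===== PORT A =====
-- one step of A's second loop: if d[j] > 0: d[j] -= 1; temp += j
def pvPick (s : PySem.Dict Char Int × List Char) (j : Char) : PySem.Dict Char Int × List Char :=
  if s.1.getD j 0 > 0 then (s.1.modify j 0 (· - 1), s.2 ++ [j]) else s

-- the tail of A after temp is built: the two special cases, else ''.join(sorted(temp, reverse=True))
def pvTailA (temp : List Char) : String :=
  if (PySem.Set.ofList temp).length = 1 ∧ PySem.List.pyGet? temp 0 = some '0' then "0"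
  else if temp = [] then "-1"
  else String.ofList (PySem.List.sorted temp (fun x => x) true)

def solution (X : String) (Y : String) : String :=
  -- if len(X) < len(Y): X, Y = Y, X
  let p := if PySem.Str.len X < PySem.Str.len Y then (Y, X) else (X, Y)
  -- for i in X: d[i] += 1   (defaultdict(int))
  let d := p.1.toList.foldl (fun d i => d.modify i 0 (· + 1)) (PySem.Dict.empty : PySem.Dict Char Int)
  -- for j in Y: if d[j] > 0: d[j] -= 1; temp += j
  pvTailA ((p.2.toList.foldl pvPick (d, ([] : List Char))).2)

-- ===== PORT B =====
def solution_alt (X : String) (Y : String) : String :=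
  let cx := X.toList.foldl (fun d ch => d.insert ch (d.getD ch 0 + 1)) (PySem.Dict.empty : PySem.Dict Char Int)
  let cy := Y.toList.foldl (fun d ch => d.insert ch (d.getD ch 0 + 1)) (PySem.Dict.empty : PySem.Dict Char Int)
  -- common = sorted((c for c in cx if c in cy), reverse=True)
  let common := PySem.List.sorted (cx.keys.filter (fun c => cy.contains c)) (fun x => x) true
  if common = [] then "-1"
  else if common = ['0'] then "0"
  else String.ofList ((common.map (fun c => List.replicate (min (cx.getD c 0) (cy.getD c 0)).toNat c)).flatten)

-- ===== PRECONDITION & SPEC =====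
def Spec_solution (X : String) (Y : String) (out : String) : Prop := out = solution_alt X Y
instance (X : String) (Y : String) (out : String) : Decidable (Spec_solution X Y out) := by unfold Spec_solution; infer_instance

-- ===== CLAIM (what is proved, stated in full; the proofs are below) =====
def Claim_equal_solution : Prop := ∀ (X : String) (Y : String), Dom_solution X Y → Spec_solution X Y (solution X Y)

-- ===== LEMMAS AND PROOFS =====

-- min of the two per-character counts: the multiset both programs realise
def pvM (xs ys : List Char) (c : Char) : Nat := min (xs.count c) (ys.count c)

-- invariant of A's second loop: an occurrence of c is kept exactly while the budget d[c] lasts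
lemma pick_count (ys : List Char) (d : PySem.Dict Char Int) (acc : List Char) (c : Char) :
    ((ys.foldl pvPick (d, acc)).2).count c
      = acc.count c + min (ys.count c) (d.getD c 0).toNat := by
  induction ys generalizing d acc with
  | nil => simp
  | cons j ys ih =>
    simp only [List.foldl_cons]
    by_cases hj : d.getD j 0 > 0
    · simp only [pvPick, hj, if_pos]
      rw [ih]
      by_cases hc : j = c
      · subst hc
        rw [PySem.Dict.getD_modify_self]
        simp [List.count_append]
        omega
      · rw [PySem.Dict.getD_modify_of_ne _ _ _ (Ne.symm hc)]
        simp [List.count_append, hc]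
    · simp only [pvPick, hj, if_neg, not_false_iff]
      rw [ih]
      by_cases hc : j = c
      · subst hc
        simp
        omega
      · simp [hc]

-- A's temp holds exactly min(shorter-count, longer-count) occurrences of every character
lemma temp_count (xl ys : List Char) (c : Char) :
    ((ys.foldl pvPick
        ((xl.foldl (fun d i => d.modify i 0 (· + 1)) (PySem.Dict.empty : PySem.Dict Char Int)), ([] : List Char))).2).count c
      = pvM ys xl c := by
  rw [pick_count, PySem.Dict.getD_foldl_modify_add_one]
  simp [PySem.Dict.getD_empty, pvM]

-- a nodup list whose members are exactly {x} is [x]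
lemma nodup_mem_singleton {x : Char} {L : List Char} (hnd : L.Nodup)
    (h : ∀ c, c ∈ L ↔ c = x) : L = [x] := by
  cases L with
  | nil => exact absurd ((h x).mpr rfl) (by simp)
  | cons a t =>
    have ha : a = x := (h a).mp (List.mem_cons_self)
    subst ha
    have ht : t = [] := by
      cases t with
      | nil => rfl
      | cons b t' =>
        have hb : b = a := (h b).mp (by simp)
        subst hb
        simp at hnd
    simp [ht]

lemma count_flatten_replicate (L : List Char) (f : Char → Nat) (hnd : L.Nodup) (c : Char) :
    ((L.map (fun k => List.replicate (f k) k)).flatten).count c = if c ∈ L then f c else 0 := by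
  induction L with
  | nil => simp
  | cons k t ih =>
    simp only [List.nodup_cons] at hnd
    simp only [List.map_cons, List.flatten_cons, List.count_append, List.count_replicate,
      ih hnd.2, List.mem_cons]
    by_cases hc : k = c
    · subst hc
      simp [hnd.1]
    · simp [hc, Ne.symm hc]

-- reverse=True twin of sorted_id_eq_of_perm_of_pairwise (identity key; ties are identical elements)
lemma sorted_id_rev_eq_of_perm_of_pairwise_ge (xs ys : List Char)
    (hp : ys.Perm xs) (hs : ys.Pairwise (fun a b => b ≤ a)) :
    PySem.List.sorted xs (fun x => x) true = ys := by
  refine List.Perm.eq_of_pairwise (le := fun a b => b ≤ a) ?_ ?_ hs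
    ((PySem.List.sorted_perm xs (fun x => x) true).trans hp.symm)
  · intro a b _ _ h1 h2
    exact le_antisymm h2 h1
  · exact PySem.List.sorted_pairwise_rev xs (fun x => x)

-- the common tail: for ANY list t realising the min-count multiset, A's return equals B's
lemma tail_eq (X Y : String) (t : List Char)
    (ht : ∀ c, t.count c = pvM X.toList Y.toList c) :
    pvTailA t = solution_alt X Y := by
  unfold pvTailA solution_alt
  simp only [PySem.Dict.foldl_insert_getD_add_one_eq_counter, PySem.Dict.keys_counter,
    PySem.Dict.contains_counter, PySem.Dict.getD_counter]
  set K := (PySem.Set.ofList X.toList).filter (fun c => Y.toList.contains c) with hK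
  set common := PySem.List.sorted K (fun x => x) true with hcom
  have hmemc : ∀ c, c ∈ common ↔ (c ∈ X.toList ∧ c ∈ Y.toList) := by
    intro c
    rw [hcom, PySem.List.mem_sorted, hK, List.mem_filter]
    simp [PySem.Set.mem_ofList]
  have hmt : ∀ c, c ∈ t ↔ c ∈ common := by
    intro c
    rw [hmemc, ← List.count_pos_iff, ht, pvM]
    constructor
    · intro h
      constructor <;> [skip; skip] <;>
        · rw [← List.count_pos_iff]; omega
    · rintro ⟨h1, h2⟩
      rw [← List.count_pos_iff] at h1 h2
      omega
  have hnodup : common.Nodup := by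
    rw [hcom, (PySem.List.sorted_perm K (fun x => x) true).nodup_iff]
    exact List.Nodup.filter _ (PySem.Set.nodup_ofList _)
  have hgt : common.Pairwise (fun a b => b < a) := by
    have h1 := PySem.List.sorted_pairwise_rev K (fun x => x)
    rw [← hcom] at h1
    exact (h1.and hnodup).imp (fun ⟨hle, hne⟩ => lt_of_le_of_ne hle (Ne.symm hne))
  have hf : ∀ c, (min ((X.toList.count c : Int)) ((Y.toList.count c : Int))).toNat
      = pvM X.toList Y.toList c := by
    intro c; unfold pvM; omega
  by_cases hC0 : common = []
  · have ht0 : t = [] := by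
      rw [List.eq_nil_iff_forall_not_mem]
      intro c hc
      rw [hmt, hC0] at hc
      simp at hc
    simp [ht0, hC0, PySem.Set.ofList]
  · by_cases hCz : common = ['0']
    · have hmt0 : ∀ c, c ∈ t ↔ c = '0' := by
        intro c; rw [hmt, hCz]; simp
      have hset : PySem.Set.ofList t = ['0'] :=
        nodup_mem_singleton (PySem.Set.nodup_ofList t)
          (fun c => by rw [PySem.Set.mem_ofList]; exact hmt0 c)
      have htne : t ≠ [] := fun h => by
        have := (hmt0 '0').mpr rfl
        rw [h] at this; simp at this
      obtain ⟨h0, t', rfl⟩ := List.exists_cons_of_ne_nil htne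
      have hh : h0 = '0' := (hmt0 h0).mp (by simp)
      subst hh
      have hget : PySem.List.pyGet? ('0' :: t') 0 = some '0' := by
        simp [PySem.List.pyGet?, PySem.List.pyIdx?]
      rw [if_pos ⟨by simp [hset], hget⟩, if_neg (by simp [hCz]), if_pos hCz]
    · -- general branch
      have htne : t ≠ [] := by
        obtain ⟨c, hc⟩ := List.exists_mem_of_ne_nil _ hC0
        intro h
        rw [← hmt] at hc
        rw [h] at hc; simp at hc
      -- A's first condition is false, else common would be ['0']
      have hcond : ¬ ((PySem.Set.ofList t).length = 1 ∧ PySem.List.pyGet? t 0 = some '0') := by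
        rintro ⟨hlen, hget⟩
        obtain ⟨x, hx⟩ := List.length_eq_one_iff.mp hlen
        have hmem : ∀ c, c ∈ t ↔ c = x := by
          intro c
          rw [← PySem.Set.mem_ofList t c, hx]
          simp
        have h0t : '0' ∈ t := by
          obtain ⟨h0, t', rfl⟩ := List.exists_cons_of_ne_nil htne
          simp [PySem.List.pyGet?, PySem.List.pyIdx?] at hget
          simp [hget]
        have hx0 : x = '0' := ((hmem '0').mp h0t).symm
        subst hx0
        exact hCz (nodup_mem_singleton hnodup (fun c => by rw [← hmt]; exact hmem c))
      rw [if_neg hcond, if_neg htne, if_neg hC0, if_neg hCz]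
      -- main equality of the sorted string
      congr 1
      apply sorted_id_rev_eq_of_perm_of_pairwise_ge
      · -- flatten ~ t
        rw [List.perm_iff_count]
        intro a
        have := count_flatten_replicate common
          (fun c => (min ((X.toList.count c : Int)) ((Y.toList.count c : Int))).toNat) hnodup a
        rw [this, ht a]
        by_cases ha : a ∈ common
        · simp [ha, hf a]
        · have : t.count a = 0 := by
            rw [List.count_eq_zero]
            intro hmem; exact ha ((hmt a).mp hmem)
          rw [ht a] at this
          simp [ha, this]
      · -- flatten is weakly decreasing
        rw [List.pairwise_flatten]
        constructor
        · intro l hl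
          simp only [List.mem_map] at hl
          obtain ⟨k, _, rfl⟩ := hl
          rw [List.pairwise_replicate]
          right; exact le_refl k
        · rw [List.pairwise_map]
          refine hgt.imp ?_
          intro a b hab x hx y hy
          rw [List.eq_of_mem_replicate hx, List.eq_of_mem_replicate hy]
          exact le_of_lt hab

-- ===== VERDICT (by name: the statement is the Claim_ definition above) =====
theorem solution_spec : Claim_equal_solution := by
  intro X Y _
  unfold Spec_solution solution
  by_cases h : PySem.Str.len X < PySem.Str.len Y
  · simp only [if_pos h]
    exact tail_eq X Y _ (fun c => temp_count Y.toList X.toList c)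
  · simp only [if_neg h]
    refine tail_eq X Y _ (fun c => ?_)
    rw [temp_count]
    unfold pvM
    omega
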